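-- pv_equiv track=rewrite | github.com/rebuilder945/FL_research | ast_research/python_code_5.23/page4/success_code/郑宏-3226-2023-10-20_21_04_39.py | seach
-- ===== SOURCE A (Python) =====
-- def seach(x):
--     a=len(x)//2
--     c=[]
--     for i in range(len(x)):
--         b=x.count(x[i])
--         if b>a:
--             c.append(x[i])
--         else:
--             continue
--     return(c)
-- ===== SOURCE B (Python) =====
-- def seach(x):
--     # Boyer-Moore majority vote: one pass for a candidate, then one count.
--     if not x:
--         return []
--     cand = x[0]
--     votes = 0
--     for e in x:
--         if votes == 0:
--             cand = e
--             votes = 1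
--         elif e == cand:
--             votes += 1
--         else:
--             votes -= 1
--     cnt = x.count(cand)
--     return [cand] * cnt if cnt > len(x) // 2 else []
-- ===== Notes on version B (the rewrite author's own statement) =====
-- stated objective: faster
-- what changed: Replaces the per-index rescan with x.count (quadratic) by Boyer-Moore majority voting: one pass maintaining a candidate and a vote counter, then a single final count.
import Mathlib
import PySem

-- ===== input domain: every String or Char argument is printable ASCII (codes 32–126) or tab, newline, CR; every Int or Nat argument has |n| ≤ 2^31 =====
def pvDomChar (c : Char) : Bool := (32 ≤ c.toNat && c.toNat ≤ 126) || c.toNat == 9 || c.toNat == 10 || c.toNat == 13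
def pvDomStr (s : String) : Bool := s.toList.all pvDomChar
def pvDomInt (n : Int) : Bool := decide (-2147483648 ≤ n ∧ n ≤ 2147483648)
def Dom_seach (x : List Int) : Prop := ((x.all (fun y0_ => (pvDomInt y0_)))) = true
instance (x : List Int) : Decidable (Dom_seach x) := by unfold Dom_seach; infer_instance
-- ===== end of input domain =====

-- B replaces A's quadratic per-index rescan with one-pass Boyer-Moore majority voting plus a single final count (faster).


-- ===== PORT A =====
def seach (x : List Int) : List Int :=
  let a := PySem.Int.floordiv (x.length : Int) 2
  let c : List Int := []
  (PySem.List.pyRange 0 (x.length : Int) 1).foldl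
    (fun c i =>
      let b : Int := (x.count (PySem.List.pyGetD x i 0) : Int)
      if b > a then c ++ [PySem.List.pyGetD x i 0] else c) c

-- ===== PORT B =====
-- one voting step of Boyer-Moore: state (candidate, votes)
def bmStep (s : Int × Int) (e : Int) : Int × Int :=
  if s.2 = 0 then (e, 1)
  else if e = s.1 then (s.1, s.2 + 1)
  else (s.1, s.2 - 1)

def seach_alt (x : List Int) : List Int :=
  match x with
  | [] => []
  | h :: _ =>
    let s := x.foldl bmStep (h, 0)
    let cnt := x.count s.1
    if (cnt : Int) > PySem.Int.floordiv (x.length : Int) 2 then List.replicate cnt s.1 else []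

-- ===== PRECONDITION & SPEC =====
def Spec_seach (x : List Int) (out : List Int) : Prop := out = seach_alt x
instance (x : List Int) (out : List Int) : Decidable (Spec_seach x out) := by unfold Spec_seach; infer_instance

-- ===== CLAIM (what is proved, stated in full; the proofs are below) =====
def Claim_equal_seach : Prop := ∀ (x : List Int), Dom_seach x → Spec_seach x (seach x)

-- ===== LEMMAS AND PROOFS =====

-- Prop-conditioned variant of PySem.List.foldl_append_if (our port's if-test is a Prop)
theorem foldl_ite_filter {Q : Int → Prop} [DecidablePred Q] (l acc : List Int) :
    l.foldl (fun c v => if Q v then c ++ [v] else c) acc = acc ++ l.filter (fun v => decide (Q v)) := by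
  induction l generalizing acc with
  | nil => simp
  | cons a l ih => by_cases hQ : Q a <;> simp [hQ, ih]

-- A computes the filter of x by "count > len//2"
theorem seach_eq_filter (x : List Int) :
    seach x = x.filter (fun v => decide ((x.count v : Int) > PySem.Int.floordiv (x.length : Int) 2)) := by
  unfold seach
  simp only []
  rw [PySem.List.foldl_pyRange_zero_pyGetD' x 0
    (fun c v => if ((x.count v : Int) > PySem.Int.floordiv (x.length : Int) 2) then c ++ [v] else c) []]
  rw [foldl_ite_filter]
  simp

-- Boyer-Moore invariant
def bmInv (p : List Int) (s : Int × Int) : Prop :=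
  0 ≤ s.2 ∧ 2 * (p.count s.1 : Int) ≤ p.length + s.2 ∧
    ∀ v, v ≠ s.1 → 2 * (p.count v : Int) ≤ (p.length : Int) - s.2

theorem bm_fold (l : List Int) : ∀ (p : List Int) (s : Int × Int),
    bmInv p s → bmInv (p ++ l) (l.foldl bmStep s) := by
  induction l with
  | nil => intro p s h; simpa using h
  | cons e l ih =>
    intro p s h
    obtain ⟨hk, hc, hv⟩ := h
    have happ : p ++ e :: l = (p ++ [e]) ++ l := by simp
    rw [happ, List.foldl_cons]
    apply ih
    have hlen : ((p ++ [e]).length : Int) = (p.length : Int) + 1 := by simp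
    have hcount : ∀ w : Int, ((p ++ [e]).count w : Int) =
        (p.count w : Int) + (if e = w then 1 else 0) := by
      intro w
      rw [List.count_append, List.count_singleton]
      by_cases hew : e = w
      · simp [hew]
      · simp [hew]
    unfold bmStep bmInv
    split_ifs with h0 he <;> dsimp only <;> rw [hlen] at *
    · -- votes = 0, new candidate e
      refine ⟨by omega, ?_, ?_⟩
      · rw [hcount, hlen, if_pos rfl]
        by_cases hec : e = s.1
        · rw [hec]; omega
        · have h2 := hv e hec; omega
      · intro v hvne
        have hev : e ≠ v := fun hh => hvne hh.symm
        rw [hcount, hlen, if_neg hev]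
        by_cases hvc : v = s.1
        · rw [hvc]; omega
        · have h2 := hv v hvc; omega
    · -- e = cand, votes += 1
      refine ⟨by omega, ?_, ?_⟩
      · rw [hcount, hlen, if_pos he]; omega
      · intro v hvne
        have h2 := hv v hvne
        have hev : e ≠ v := by rw [he]; exact fun hh => hvne hh.symm
        rw [hcount, hlen, if_neg hev]; omega
    · -- e ≠ cand, votes -= 1
      refine ⟨by omega, ?_, ?_⟩
      · rw [hcount, hlen, if_neg he]; omega
      · intro v hvne
        have h2 := hv v hvne
        rw [hcount, hlen]
        by_cases hev : e = v
        · rw [if_pos hev]; omega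
        · rw [if_neg hev]; omega

-- count of every non-candidate is at most half the length
theorem filter_count_eq_replicate (x : List Int) (c : Int) :
    x.filter (fun v => v == c) = List.replicate (x.count c) c := by
  induction x with
  | nil => simp
  | cons a l ih =>
    by_cases hac : a = c
    · subst hac; simp [List.replicate_succ, ih]
    · simp [hac, ih]

theorem seach_main (x : List Int) : seach x = seach_alt x := by
  cases x with
  | nil => rfl
  | cons h t =>
    rw [seach_eq_filter]
    have hinv := bm_fold (h :: t) [] (h, 0) ⟨le_refl 0, by simp, by simp⟩
    simp only [List.nil_append] at hinv
    simp only [seach_alt]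
    obtain ⟨hk, hcc, hminor⟩ := hinv
    set s := (h :: t).foldl bmStep (h, 0) with hs
    have hfd : PySem.Int.floordiv (((h :: t).length : Nat) : Int) 2 = (((h :: t).length : Nat) : Int) / 2 :=
      PySem.Int.floordiv_eq_ediv_of_pos (by omega)
    rw [hfd]
    simp only [List.length_cons, Nat.cast_add, Nat.cast_one] at hcc hminor ⊢
    by_cases hmaj : (((t.length : Int) + 1) / 2 < ((h :: t).count s.1 : Int))
    · rw [if_pos hmaj, ← filter_count_eq_replicate (h :: t) s.1]
      apply List.filter_congr
      intro v hv
      by_cases hvc : v = s.1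
      · subst hvc; simp [hmaj]
      · have h2 := hminor v hvc
        have hno : ¬ (((t.length : Int) + 1) / 2 < ((h :: t).count v : Int)) := by omega
        simp [hno, hvc]
    · rw [if_neg hmaj, List.filter_eq_nil_iff]
      intro v hv
      by_cases hvc : v = s.1
      · subst hvc; simpa using hmaj
      · have h2 := hminor v hvc
        have hno : ¬ (((t.length : Int) + 1) / 2 < ((h :: t).count v : Int)) := by omega
        simpa using hno

-- ===== VERDICT (by name: the statement is the Claim_ definition above) =====
theorem seach_spec : Claim_equal_seach := by
  intro x _
  unfold Spec_seach
  exact seach_main x
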